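-- pv_equiv track=rewrite | github.com/kobato-chan1912/practice-algorithms | codelearn/maxLenSubStr/solution.py | maxLenSubStr
-- ===== SOURCE A (Python) =====
-- def maxLenSubStr(string):
--     dct = {}
--     m = 0
--     for i in range(len(string)):
--         char = string[i]
--         if char in dct.keys():
--             a = i - dct[char]
--             if a > m:
--                 m = a
--         else:
--             dct.setdefault(char, i)
--     return m + 1
-- ===== SOURCE B (Python) =====
-- def maxLenSubStr(string):
--     first = {}
--     last = {}
--     for i, c in enumerate(string):
--         first.setdefault(c, i)
--         last[c] = i
--     best = 0
--     for c in first: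
--         span = last[c] - first[c]
--         if span > best:
--             best = span
--     return best + 1
-- ===== Notes on version B (the rewrite author's own statement) =====
-- stated objective: alternative
-- what changed: Replaces A's single running-max scan (first-occurrence dict plus max of i - first[c] updated at every repeat) by a two-phase computation: one table-building pass recording each character's first and last index, then a separate pass over the distinct characters taking the max of last - first.
import Mathlib
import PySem

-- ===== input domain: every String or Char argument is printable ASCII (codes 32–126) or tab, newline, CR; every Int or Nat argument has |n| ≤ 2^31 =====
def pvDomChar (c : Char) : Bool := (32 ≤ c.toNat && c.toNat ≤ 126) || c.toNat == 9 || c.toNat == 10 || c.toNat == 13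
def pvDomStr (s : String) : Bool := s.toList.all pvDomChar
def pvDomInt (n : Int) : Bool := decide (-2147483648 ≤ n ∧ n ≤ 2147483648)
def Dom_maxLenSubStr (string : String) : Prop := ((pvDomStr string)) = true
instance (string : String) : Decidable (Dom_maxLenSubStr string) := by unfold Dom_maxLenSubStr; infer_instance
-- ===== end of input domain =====

-- B computes the same value by a two-phase pass (first/last occurrence tables, then a max over distinct characters) instead of A's single running-max scan; objective: alternative decomposition, same cost.

-- ===== PORT A =====
-- loop body of A: char = string[i]; if char in dct: a = i - dct[char]; if a > m: m = a; else: dct.setdefault(char, i)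
def aStep (cs : List Char) (st : PySem.Dict Char Int × Int) (i : Int) : PySem.Dict Char Int × Int :=
  match PySem.List.pyGet? cs i with
  | some char =>
    match st.1.get? char with
    | some v => if i - v > st.2 then (st.1, i - v) else st
    | none => (st.1.setdefault char i, st.2)
  | none => st  -- unreachable: i ranges over range(len(string))

def maxLenSubStr (string : String) : Int :=
  ((PySem.List.pyRange 0 (PySem.Str.len string) 1).foldl (aStep string.toList)
    (PySem.Dict.empty, 0)).2 + 1

-- ===== PORT B =====
-- loop body of B's first pass: first.setdefault(c, i); last[c] = i
def bStep (st : PySem.Dict Char Int × PySem.Dict Char Int) (e : Int × Char) :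
    PySem.Dict Char Int × PySem.Dict Char Int :=
  (st.1.setdefault e.2 e.1, st.2.insert e.2 e.1)

def bScan (cs : List Char) : PySem.Dict Char Int × PySem.Dict Char Int :=
  (PySem.List.enumerate cs).foldl bStep (PySem.Dict.empty, PySem.Dict.empty)

-- B's second pass: best = 0; for c in first: span = last[c] - first[c]; if span > best: best = span
def bMax (first last : PySem.Dict Char Int) : Int :=
  first.keys.foldl (fun b c =>
    if last.getD c 0 - first.getD c 0 > b then last.getD c 0 - first.getD c 0 else b) 0

def maxLenSubStr_alt (string : String) : Int :=
  let p := bScan string.toList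
  bMax p.1 p.2 + 1

-- ===== PRECONDITION & SPEC =====
def Spec_maxLenSubStr (string : String) (out : Int) : Prop := out = maxLenSubStr_alt string
instance (string : String) (out : Int) : Decidable (Spec_maxLenSubStr string out) := by unfold Spec_maxLenSubStr; infer_instance

-- ===== CLAIM =====
def Claim_equal_maxLenSubStr : Prop := ∀ (string : String), Dom_maxLenSubStr string → Spec_maxLenSubStr string (maxLenSubStr string)

-- ===== LEMMAS AND PROOFS =====

-- A's whole loop, over the character list
def aLoop (cs : List Char) : PySem.Dict Char Int × Int :=
  (PySem.List.pyRange 0 (PySem.List.len cs) 1).foldl (aStep cs) (PySem.Dict.empty, 0)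

lemma if_gt_eq_max (b v : Int) : (if v > b then v else b) = max b v := by
  split_ifs with h <;> omega

-- the branching step of bMax is a running max
lemma step_eq_max (f : Char → Int) (l : List Char) (m : Int) :
    l.foldl (fun b c => if f c > b then f c else b) m = l.foldl (fun b c => max b (f c)) m := by
  simp only [if_gt_eq_max]

-- pull a max out of the start value of a running max
lemma foldl_max_start (f : Char → Int) (l : List Char) (m a : Int) :
    l.foldl (fun b c => max b (f c)) (max m a) = max (l.foldl (fun b c => max b (f c)) m) a := by
  induction l generalizing m with
  | nil => rfl
  | cons c t ih =>
    simp only [List.foldl_cons]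
    rw [max_right_comm m a (f c), ih]

-- raising the f-value of one listed element to g raises the running max accordingly
lemma foldl_max_update (f g : Char → Int) (x : Char) (l : List Char)
    (hag : ∀ c ∈ l, c ≠ x → g c = f c) (hge : f x ≤ g x) (hx : x ∈ l) (m : Int) :
    l.foldl (fun b c => max b (g c)) m = max (l.foldl (fun b c => max b (f c)) m) (g x) := by
  induction l generalizing m with
  | nil => cases hx
  | cons c t ih =>
    simp only [List.foldl_cons]
    by_cases hcx : c = x
    · subst hcx
      have hstart := foldl_max_start g t m (g c)
      by_cases hxt : c ∈ t
      · rw [hstart, ih (fun d hd => hag d (List.mem_cons_of_mem _ hd)) hxt,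
            foldl_max_start f t m (f c)]
        omega
      · have hcongr : t.foldl (fun b d => max b (g d)) m = t.foldl (fun b d => max b (f d)) m := by
          refine PySem.List.foldl_congr_mem t _ _ m ?_
          intro acc d hd
          rw [hag d (List.mem_cons_of_mem _ hd) (fun hdx => hxt (hdx ▸ hd))]
        rw [hstart, hcongr, foldl_max_start f t m (f c)]
        omega
    · have hx' : x ∈ t := by
        rcases List.mem_cons.mp hx with h | h
        · exact absurd h.symm hcx
        · exact h
      rw [hag c (List.mem_cons_self) hcx,
          ih (fun d hd => hag d (List.mem_cons_of_mem _ hd)) hx']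

lemma pyGet?_append_lt (cs : List Char) (x : Char) {i : Int} (h0 : 0 ≤ i)
    (hi : i < (cs.length : Int)) :
    PySem.List.pyGet? (cs ++ [x]) i = PySem.List.pyGet? cs i := by
  rw [PySem.List.pyGet?_of_nonneg _ h0, PySem.List.pyGet?_of_nonneg _ h0]
  exact List.getElem?_append_left (by omega)

-- A's loop over cs ++ [x] is A's loop over cs followed by one step at index |cs|
lemma aLoop_append (cs : List Char) (x : Char) :
    aLoop (cs ++ [x]) = aStep (cs ++ [x]) (aLoop cs) (cs.length : Int) := by
  unfold aLoop
  have hlen : PySem.List.len (cs ++ [x]) = (cs.length : Int) + 1 := by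
    simp [PySem.List.len_eq]
  rw [hlen, PySem.List.pyRange_one_succ_right (by omega), List.foldl_append,
      List.foldl_cons, List.foldl_nil, PySem.List.len_eq]
  congr 1
  refine PySem.List.foldl_congr_mem _ _ _ _ ?_
  intro st i hi
  obtain ⟨h0, hlt⟩ := PySem.List.mem_pyRange_one.mp hi
  unfold aStep
  rw [pyGet?_append_lt cs x h0 hlt]

lemma bScan_append (cs : List Char) (x : Char) :
    bScan (cs ++ [x]) = bStep (bScan cs) ((cs.length : Int), x) := by
  unfold bScan
  rw [PySem.List.enumerate_append, PySem.List.enumerate_cons, PySem.List.enumerate_nil,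
      List.foldl_append, List.foldl_cons, List.foldl_nil]
  norm_num

-- the combined invariant of A's scan and B's two tables
theorem main_inv (cs : List Char) :
    (aLoop cs).1 = (bScan cs).1 ∧
    (bScan cs).1.keys = PySem.Set.ofList cs ∧
    (∀ c ∈ cs, (bScan cs).1.getD c 0 ≤ (bScan cs).2.getD c 0 ∧
      (bScan cs).2.getD c 0 < (cs.length : Int)) ∧
    0 ≤ (aLoop cs).2 ∧
    (aLoop cs).2 = bMax (bScan cs).1 (bScan cs).2 := by
  induction cs using List.reverseRecOn with
  | nil =>
    refine ⟨rfl, rfl, ?_, le_refl 0, rfl⟩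
    intro c hc; cases hc
  | append_singleton cs x ih =>
    obtain ⟨h1, h2, h3, h4, h5⟩ := ih
    have hget : PySem.List.pyGet? (cs ++ [x]) (cs.length : Int) = some x :=
      PySem.List.pyGet?_append_length cs [] x
    rw [aLoop_append, bScan_append]
    by_cases hmem : x ∈ cs
    · -- x occurs in cs: A's "seen" branch, B overwrites last[x]
      have hcont : (bScan cs).1.contains x = true := by
        rw [PySem.Dict.contains_iff_mem_keys, h2]
        exact (PySem.Set.mem_ofList _ _).mpr hmem
      have hcontA : (aLoop cs).1.contains x = true := by rw [h1]; exact hcont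
      obtain ⟨v, hv⟩ : ∃ v, (aLoop cs).1.get? x = some v := by
        cases hq : (aLoop cs).1.get? x with
        | none =>
          rw [PySem.Dict.get?_eq_none_iff_contains] at hq
          rw [hq] at hcontA; cases hcontA
        | some v => exact ⟨v, rfl⟩
      have hvD : (bScan cs).1.getD x 0 = v := by
        rw [← h1]; exact PySem.Dict.getD_of_get?_eq_some _ 0 hv
      have hsd : (bScan cs).1.setdefault x (cs.length : Int) = (bScan cs).1 :=
        PySem.Dict.setdefault_of_contains _ _ hcont
      have hstep : aStep (cs ++ [x]) (aLoop cs) (cs.length : Int)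
          = ((aLoop cs).1, max (aLoop cs).2 ((cs.length : Int) - v)) := by
        unfold aStep
        rw [hget]
        simp only [hv, ← if_gt_eq_max]
        split_ifs <;> simp
      refine ⟨?_, ?_, ?_, ?_, ?_⟩
      · simp [hstep, bStep, hsd, h1]
      · simp only [bStep, hsd, h2, PySem.Set.ofList_append_singleton]
        rw [PySem.Set.add_of_mem ((PySem.Set.mem_ofList _ _).mpr hmem)]
      · intro c hc
        simp only [bStep, hsd]
        rcases List.mem_append.mp hc with hcs | hcx
        · by_cases hce : c = x
          · subst hce
            rw [PySem.Dict.getD_insert_self, hvD]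
            have ha := (h3 c hcs).1
            have hb := (h3 c hcs).2
            refine ⟨by omega, ?_⟩
            simp only [List.length_append, List.length_cons, List.length_nil]
            push_cast; omega
          · rw [PySem.Dict.getD_insert_of_ne _ _ _ hce]
            refine ⟨(h3 c hcs).1, ?_⟩
            have hb := (h3 c hcs).2
            simp only [List.length_append, List.length_cons, List.length_nil]
            push_cast; omega
        · have hce : c = x := by simpa using hcx
          subst hce
          rw [PySem.Dict.getD_insert_self, hvD]
          have ha := (h3 c hmem).1
          have hb := (h3 c hmem).2
          refine ⟨by omega, ?_⟩
          simp only [List.length_append, List.length_cons, List.length_nil]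
          push_cast; omega
      · rw [hstep]
        exact le_trans h4 (le_max_left _ _)
      · rw [hstep]
        simp only [bStep]
        rw [hsd]
        show max (aLoop cs).2 ((cs.length : Int) - v)
            = bMax (bScan cs).1 ((bScan cs).2.insert x (cs.length : Int))
        have hxk : x ∈ (bScan cs).1.keys := by
          rw [h2]; exact (PySem.Set.mem_ofList _ _).mpr hmem
        unfold bMax
        rw [step_eq_max (fun c => ((bScan cs).2.insert x (cs.length : Int)).getD c 0 - (bScan cs).1.getD c 0)]
        rw [foldl_max_update
              (fun c => (bScan cs).2.getD c 0 - (bScan cs).1.getD c 0)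
              (fun c => ((bScan cs).2.insert x (cs.length : Int)).getD c 0 - (bScan cs).1.getD c 0)
              x (bScan cs).1.keys
              (by intro c _ hne; simp only [PySem.Dict.getD_insert_of_ne _ _ _ hne])
              (by
                have h1' := (h3 x hmem).2
                simp only [PySem.Dict.getD_insert_self]
                omega)
              hxk 0]
        rw [← step_eq_max]
        have h5' : (aLoop cs).2 = List.foldl
            (fun b c => if (bScan cs).2.getD c 0 - (bScan cs).1.getD c 0 > b
              then (bScan cs).2.getD c 0 - (bScan cs).1.getD c 0 else b) 0 (bScan cs).1.keys := h5
        rw [← h5']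
        simp only [PySem.Dict.getD_insert_self, hvD]
    · -- x is new: A's setdefault branch, B inserts a fresh key
      have hcont : (bScan cs).1.contains x = false := by
        rw [← Bool.not_eq_true, PySem.Dict.contains_iff_mem_keys, h2]
        intro hk
        exact hmem ((PySem.Set.mem_ofList _ _).mp hk)
      have hcontA : (aLoop cs).1.get? x = none := by
        rw [PySem.Dict.get?_eq_none_iff_contains, h1]; exact hcont
      have hsd : (bScan cs).1.setdefault x (cs.length : Int)
          = (bScan cs).1.insert x (cs.length : Int) :=
        PySem.Dict.setdefault_of_not_contains _ _ hcont
      have hstep : aStep (cs ++ [x]) (aLoop cs) (cs.length : Int)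
          = ((aLoop cs).1.setdefault x (cs.length : Int), (aLoop cs).2) := by
        unfold aStep
        rw [hget]
        simp only [hcontA]
      have hxk : x ∉ (bScan cs).1.keys := by
        rw [h2]
        exact fun hk => hmem ((PySem.Set.mem_ofList _ _).mp hk)
      refine ⟨?_, ?_, ?_, ?_, ?_⟩
      · simp [hstep, bStep, h1]
      · simp only [bStep, hsd, PySem.Dict.keys_insert_of_not_contains _ _ hcont, h2,
          PySem.Set.ofList_append_singleton]
        rw [PySem.Set.add_of_not_mem (fun hk => hmem ((PySem.Set.mem_ofList _ _).mp hk))]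
      · intro c hc
        simp only [bStep, hsd]
        rcases List.mem_append.mp hc with hcs | hcx
        · have hce : c ≠ x := fun h => hmem (h ▸ hcs)
          rw [PySem.Dict.getD_insert_of_ne _ _ _ hce, PySem.Dict.getD_insert_of_ne _ _ _ hce]
          refine ⟨(h3 c hcs).1, ?_⟩
          have hb := (h3 c hcs).2
          simp only [List.length_append, List.length_cons, List.length_nil]
          push_cast; omega
        · have hce : c = x := by simpa using hcx
          subst hce
          rw [PySem.Dict.getD_insert_self, PySem.Dict.getD_insert_self]
          refine ⟨le_refl _, ?_⟩
          simp only [List.length_append, List.length_cons, List.length_nil]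
          push_cast; omega
      · rw [hstep]; exact h4
      · rw [hstep]
        simp only [bStep]
        rw [hsd]
        show (aLoop cs).2
            = bMax ((bScan cs).1.insert x (cs.length : Int)) ((bScan cs).2.insert x (cs.length : Int))
        unfold bMax
        rw [PySem.Dict.keys_insert_of_not_contains _ _ hcont, List.foldl_append,
            List.foldl_cons, List.foldl_nil]
        have hcongr : (bScan cs).1.keys.foldl
            (fun b c => if ((bScan cs).2.insert x (cs.length : Int)).getD c 0
                - ((bScan cs).1.insert x (cs.length : Int)).getD c 0 > b
              then ((bScan cs).2.insert x (cs.length : Int)).getD c 0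
                - ((bScan cs).1.insert x (cs.length : Int)).getD c 0 else b) 0
            = (bScan cs).1.keys.foldl
            (fun b c => if (bScan cs).2.getD c 0 - (bScan cs).1.getD c 0 > b
              then (bScan cs).2.getD c 0 - (bScan cs).1.getD c 0 else b) 0 := by
          refine PySem.List.foldl_congr_mem _ _ _ _ ?_
          intro acc c hck
          have hce : c ≠ x := fun h => hxk (h ▸ hck)
          simp only [PySem.Dict.getD_insert_of_ne _ _ _ hce]
        rw [hcongr]
        have h5' : (aLoop cs).2 = List.foldl
            (fun b c => if (bScan cs).2.getD c 0 - (bScan cs).1.getD c 0 > b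
              then (bScan cs).2.getD c 0 - (bScan cs).1.getD c 0 else b) 0 (bScan cs).1.keys := h5
        rw [← h5']
        simp only [PySem.Dict.getD_insert_self, sub_self]
        rw [if_neg (by omega)]

-- ===== VERDICT =====
theorem maxLenSubStr_spec : Claim_equal_maxLenSubStr := by
  intro s _
  show maxLenSubStr s = maxLenSubStr_alt s
  have h5 := (main_inv s.toList).2.2.2.2
  unfold maxLenSubStr maxLenSubStr_alt
  unfold aLoop at h5
  rw [PySem.List.len_eq] at h5
  rw [PySem.Str.len_eq, h5]
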